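-- pv_equiv track=rewrite | github.com/dernarius/aoc2024 | 08.py | find_all_antinodes
-- ===== SOURCE A (Python) =====
-- def find_all_antinodes(a, b, bounds):
--     ret = set()
--     diff = a[0] - b[0], a[1] - b[1]
--     s, t = a
--     while all((
--         0 <= (s := s - diff[0]) < bounds[0],
--         0 <= (t := t - diff[1]) < bounds[1],
--     )):
--         ret.add((s, t))
--
--     return ret
-- ===== SOURCE B (Python) =====
-- def _kdim(ai, di, bi):
--     # largest k >= 1 such that 0 <= ai - j*di < bi for all j in 1..k
--     # (None = every k works, 0 = not even k=1)
--     if di == 0: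
--         return None if 0 <= ai < bi else 0
--     if not (0 <= ai - di < bi):
--         return 0
--     return ai // di if di > 0 else (bi - 1 - ai) // -di
--
--
-- def find_all_antinodes(a, b, bounds):
--     d = (a[0] - b[0], a[1] - b[1])
--     k0 = _kdim(a[0], d[0], bounds[0])
--     k1 = _kdim(a[1], d[1], bounds[1])
--     if k0 is None and k1 is None:
--         raise ValueError("ray stays in bounds forever (a == b inside bounds)")
--     K = k1 if k0 is None else k0 if k1 is None else min(k0, k1)
--     return {(a[0] - k * d[0], a[1] - k * d[1]) for k in range(1, K + 1)}
-- ===== Notes on version B (the rewrite author's own statement) =====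
-- stated objective: alternative
-- what changed: B replaces A's step-by-step walk with its per-step bounds test by a closed-form computation of the number K of in-bounds steps per dimension (solving the two inequalities for k) followed by a single comprehension over range(1, K+1); Pre_ excludes a == b with a inside bounds, where A's while-loop never terminates (B raises ValueError there).
import Mathlib
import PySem

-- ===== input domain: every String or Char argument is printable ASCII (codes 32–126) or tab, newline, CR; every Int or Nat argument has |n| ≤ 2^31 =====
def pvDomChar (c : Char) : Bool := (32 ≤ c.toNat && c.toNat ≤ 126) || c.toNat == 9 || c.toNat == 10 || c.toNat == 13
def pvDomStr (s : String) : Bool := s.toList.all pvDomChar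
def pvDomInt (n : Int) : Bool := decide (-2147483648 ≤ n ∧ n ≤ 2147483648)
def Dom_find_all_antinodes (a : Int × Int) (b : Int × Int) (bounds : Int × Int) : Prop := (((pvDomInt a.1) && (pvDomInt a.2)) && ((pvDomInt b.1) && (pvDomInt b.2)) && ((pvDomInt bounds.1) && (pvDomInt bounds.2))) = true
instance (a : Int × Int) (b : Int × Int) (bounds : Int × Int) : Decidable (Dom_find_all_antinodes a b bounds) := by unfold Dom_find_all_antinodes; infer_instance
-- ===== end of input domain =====

-- B replaces A's step-by-step walk (per-step bounds test) by a closed-form computation of the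
-- number K of in-bounds steps per dimension, followed by a single comprehension (objective: alternative).

-- ===== PORT A =====
-- A's while-loop: each iteration updates both s and t (the tuple argument of all() evaluates
-- both walrus assignments), then tests both bounds; fuel only makes the loop structural —
-- on every input admitted by Pre_ the loop runs at most bounds.1.toNat + bounds.2.toNat steps (proved below).
def pvWalk (d : Int × Int) (bounds : Int × Int) : Nat → Int → Int → List (Int × Int) → List (Int × Int)
  | 0, _, _, ret => ret
  | f + 1, s, t, ret =>
    let s' := s - d.1
    let t' := t - d.2
    if (0 ≤ s' ∧ s' < bounds.1) ∧ (0 ≤ t' ∧ t' < bounds.2) then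
      pvWalk d bounds f s' t' (PySem.Set.add ret (s', t'))
    else ret

def find_all_antinodes (a : Int × Int) (b : Int × Int) (bounds : Int × Int) : List (Int × Int) :=
  let diff := (a.1 - b.1, a.2 - b.2)
  pvWalk diff bounds (bounds.1.toNat + bounds.2.toNat + 1) a.1 a.2 PySem.Set.empty

-- ===== PORT B =====
-- largest k ≥ 1 with 0 ≤ ai - j*di < bi for all j = 1..k  (none = every k works, some 0 = not even k = 1)
def pvKdim (ai di bi : Int) : Option Int :=
  if di = 0 then (if 0 ≤ ai ∧ ai < bi then none else some 0)
  else if ¬ (0 ≤ ai - di ∧ ai - di < bi) then some 0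
  else if 0 < di then some (PySem.Int.floordiv ai di)
  else some (PySem.Int.floordiv (bi - 1 - ai) (-di))

-- the k-th point of the ray a - k*d
def pvP (a d : Int × Int) (k : Int) : Int × Int := (a.1 - k * d.1, a.2 - k * d.2)

-- the set comprehension {(a0 - k*d0, a1 - k*d1) for k in range(1, K+1)}
def pvMk (a d : Int × Int) (K : Int) : List (Int × Int) :=
  PySem.Set.ofList ((PySem.List.pyRange 1 (K + 1) 1).map (pvP a d))

def find_all_antinodes_alt (a : Int × Int) (b : Int × Int) (bounds : Int × Int) : List (Int × Int) :=
  let d := (a.1 - b.1, a.2 - b.2)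
  match pvKdim a.1 d.1 bounds.1, pvKdim a.2 d.2 bounds.2 with
  | none, none => []       -- Python B raises ValueError here; A diverges; outside Pre_
  | some k0, none => pvMk a d k0
  | none, some k1 => pvMk a d k1
  | some k0, some k1 => pvMk a d (min k0 k1)

-- ===== PRECONDITION & SPEC =====
-- Pre_ excludes exactly the inputs where a = b and a lies inside bounds: there A's while-loop
-- never terminates (it re-tests the same in-bounds point forever), so A returns on no such input.
def Pre_find_all_antinodes (a : Int × Int) (b : Int × Int) (bounds : Int × Int) : Prop :=
  ¬ (a = b ∧ 0 ≤ a.1 ∧ a.1 < bounds.1 ∧ 0 ≤ a.2 ∧ a.2 < bounds.2)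
instance (a : Int × Int) (b : Int × Int) (bounds : Int × Int) : Decidable (Pre_find_all_antinodes a b bounds) := by unfold Pre_find_all_antinodes; infer_instance

def pvWitness_find_all_antinodes : (Int × Int) × (Int × Int) × (Int × Int) := ((0, 0), (1, 1), (5, 5))

def Spec_find_all_antinodes (a : Int × Int) (b : Int × Int) (bounds : Int × Int) (out : List (Int × Int)) : Prop := out = find_all_antinodes_alt a b bounds
instance (a : Int × Int) (b : Int × Int) (bounds : Int × Int) (out : List (Int × Int)) : Decidable (Spec_find_all_antinodes a b bounds out) := by unfold Spec_find_all_antinodes; infer_instance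

-- ===== CLAIM (what is proved, stated in full; the proofs are below) =====
def Claim_equal_find_all_antinodes : Prop := ∀ (a : Int × Int) (b : Int × Int) (bounds : Int × Int), Dom_find_all_antinodes a b bounds → Pre_find_all_antinodes a b bounds → Spec_find_all_antinodes a b bounds (find_all_antinodes a b bounds)

-- ===== LEMMAS AND PROOFS =====

-- per-dimension in-bounds predicate for the k-th step
def pvG (ai di bi k : Int) : Prop := 0 ≤ ai - k * di ∧ ai - k * di < bi

def pvGood (a d bounds : Int × Int) (k : Int) : Prop :=
  pvG a.1 d.1 bounds.1 k ∧ pvG a.2 d.2 bounds.2 k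

lemma pvKdim_none {ai di bi : Int} (h : pvKdim ai di bi = none) :
    di = 0 ∧ 0 ≤ ai ∧ ai < bi := by
  unfold pvKdim at h
  split_ifs at h with h1 h2 <;> simp_all

lemma pvG_of_zero {ai bi : Int} (h0 : 0 ≤ ai) (h1 : ai < bi) (k : Int) : pvG ai 0 bi k := by
  unfold pvG
  constructor <;> omega

lemma pvKdim_some {ai di bi K : Int} (h : pvKdim ai di bi = some K) :
    (0 ≤ K ∧ (K ≤ bi ∨ K ≤ 0)) ∧ (∀ k, 1 ≤ k → k ≤ K → pvG ai di bi k) ∧ ¬ pvG ai di bi (K + 1) := by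
  unfold pvKdim at h
  by_cases h1 : di = 0
  · rw [if_pos h1] at h
    by_cases h2 : 0 ≤ ai ∧ ai < bi
    · rw [if_pos h2] at h
      exact absurd h (by simp)
    · rw [if_neg h2] at h
      injection h with h
      subst h
      subst h1
      refine ⟨⟨le_refl 0, Or.inr (le_refl 0)⟩,
        fun k hk1 hk0 => absurd (hk1.trans hk0) (by omega), fun hg => ?_⟩
      unfold pvG at hg
      exact h2 ⟨by omega, by omega⟩
  · rw [if_neg h1] at h
    by_cases h2 : 0 ≤ ai - di ∧ ai - di < bi
    · rw [if_neg (not_not_intro h2)] at h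
      by_cases h3 : 0 < di
      · -- di > 0, K = ai // di
        rw [if_pos h3] at h
        injection h with h
        subst h
        have hbrk : ∀ q : Int, q ≤ PySem.Int.floordiv ai di ↔ q * di ≤ ai :=
          fun q => PySem.Int.le_floordiv_iff_mul_le h3
        set K := PySem.Int.floordiv ai di with hK
        have h1K : 1 ≤ K := (hbrk 1).2 (by omega)
        have hgood : ∀ k, 1 ≤ k → k ≤ K → pvG ai di bi k := by
          intro k hk1 hkK
          have hl : k * di ≤ ai := (hbrk k).1 hkK
          have hmono : 1 * di ≤ k * di := mul_le_mul_of_nonneg_right hk1 h3.le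
          unfold pvG
          constructor
          · linarith
          · nlinarith [h2.2]
        have hstop : ¬ pvG ai di bi (K + 1) := by
          intro hg
          unfold pvG at hg
          exact absurd ((hbrk (K + 1)).2 (by linarith [hg.1])) (by omega)
        have hbnd : K ≤ bi := by
          have hKg := hgood K (by omega) (le_refl K)
          unfold pvG at hKg
          have e1 : K - 1 ≤ (K - 1) * di := le_mul_of_one_le_right (by omega) (by omega)
          have e2 : (K - 1) * di = (ai - di) - (ai - K * di) := by ring
          linarith [hKg.1, h2.2]
        exact ⟨⟨by omega, Or.inl hbnd⟩, hgood, hstop⟩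
      · -- di < 0, K = (bi - 1 - ai) // (-di)
        rw [if_neg h3] at h
        injection h with h
        subst h
        have hdpos : 0 < -di := by omega
        have hbrk : ∀ q : Int, q ≤ PySem.Int.floordiv (bi - 1 - ai) (-di) ↔ q * (-di) ≤ bi - 1 - ai :=
          fun q => PySem.Int.le_floordiv_iff_mul_le hdpos
        set K := PySem.Int.floordiv (bi - 1 - ai) (-di) with hK
        have h1K : 1 ≤ K := (hbrk 1).2 (by omega)
        have hgood : ∀ k, 1 ≤ k → k ≤ K → pvG ai di bi k := by
          intro k hk1 hkK
          have hu : k * (-di) ≤ bi - 1 - ai := (hbrk k).1 hkK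
          have hmono : 1 * (-di) ≤ k * (-di) := mul_le_mul_of_nonneg_right hk1 hdpos.le
          unfold pvG
          constructor
          · nlinarith [h2.1]
          · nlinarith
        have hstop : ¬ pvG ai di bi (K + 1) := by
          intro hg
          unfold pvG at hg
          exact absurd ((hbrk (K + 1)).2 (by nlinarith [hg.2])) (by omega)
        have hbnd : K ≤ bi := by
          have hKg := hgood K (by omega) (le_refl K)
          unfold pvG at hKg
          have e1 : K - 1 ≤ (K - 1) * (-di) := le_mul_of_one_le_right (by omega) (by omega)
          have e2 : (K - 1) * (-di) = (ai - K * di) - (ai - di) := by ring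
          linarith [hKg.2, h2.1]
        exact ⟨⟨by omega, Or.inl hbnd⟩, hgood, hstop⟩
    · rw [if_pos h2] at h
      injection h with h
      subst h
      refine ⟨⟨le_refl 0, Or.inr (le_refl 0)⟩,
        fun k hk1 hk0 => absurd (hk1.trans hk0) (by omega), fun hg => ?_⟩
      unfold pvG at hg
      exact h2 ⟨by omega, by omega⟩

-- if the ray makes at least one step, some coordinate of d is nonzero, so pvP is injective
lemma pvP_inj {a d : Int × Int} (hd : d.1 ≠ 0 ∨ d.2 ≠ 0) {j k : Int} (h : pvP a d j = pvP a d k) :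
    j = k := by
  unfold pvP at h
  have h1 := congrArg Prod.fst h
  have h2 := congrArg Prod.snd h
  simp only at h1 h2
  rcases hd with hd | hd
  · have : j * d.1 = k * d.1 := by omega
    exact mul_right_cancel₀ hd this
  · have : j * d.2 = k * d.2 := by omega
    exact mul_right_cancel₀ hd this

-- d ≠ (0, 0) whenever at least one in-bounds step exists
lemma pvD_ne {a d bounds : Int × Int} {N : Int} (hN : 1 ≤ N)
    (hgood : ∀ k, 1 ≤ k → k ≤ N → pvGood a d bounds k)
    (hstop : ¬ pvGood a d bounds (N + 1)) : d.1 ≠ 0 ∨ d.2 ≠ 0 := by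
  by_contra hc
  push_neg at hc
  have h1 := hgood 1 (le_refl 1) hN
  apply hstop
  unfold pvGood pvG at h1 ⊢
  rw [hc.1, hc.2] at h1 ⊢
  constructor <;> constructor <;> omega

-- the walk from the k-th point appends exactly the points k+1 .. N
lemma pvWalk_spec (a d bounds : Int × Int) (N : Int) (hN0 : 0 ≤ N)
    (hgood : ∀ k, 1 ≤ k → k ≤ N → pvGood a d bounds k)
    (hstop : ¬ pvGood a d bounds (N + 1)) :
    ∀ (f : Nat) (k : Int) (acc : List (Int × Int)), 0 ≤ k → k ≤ N → (N - k).toNat ≤ f →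
      (∀ j, k < j → j ≤ N → pvP a d j ∉ acc) →
      pvWalk d bounds f (a.1 - k * d.1) (a.2 - k * d.2) acc
        = acc ++ (PySem.List.pyRange (k + 1) (N + 1) 1).map (pvP a d) := by
  intro f
  induction f with
  | zero =>
    intro k acc hk0 hkN hf _
    have hkeq : k = N := by omega
    subst hkeq
    rw [PySem.List.pyRange_one_eq_nil (by omega)]
    simp [pvWalk]
  | succ f ih =>
    intro k acc hk0 hkN hf hfresh
    simp only [pvWalk]
    have hs' : a.1 - k * d.1 - d.1 = a.1 - (k + 1) * d.1 := by ring
    have ht' : a.2 - k * d.2 - d.2 = a.2 - (k + 1) * d.2 := by ring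
    rw [hs', ht']
    by_cases hkeq : k = N
    · have hstop' : ¬ ((0 ≤ a.1 - (k + 1) * d.1 ∧ a.1 - (k + 1) * d.1 < bounds.1) ∧
          (0 ≤ a.2 - (k + 1) * d.2 ∧ a.2 - (k + 1) * d.2 < bounds.2)) := by
        rw [hkeq]; exact hstop
      rw [if_neg hstop', hkeq, PySem.List.pyRange_one_eq_nil (by omega)]
      simp
    · have hkN' : k + 1 ≤ N := by omega
      have hg : pvGood a d bounds (k + 1) := hgood (k + 1) (by omega) hkN'
      have hdne : d.1 ≠ 0 ∨ d.2 ≠ 0 := pvD_ne (show (1 : Int) ≤ N by omega) hgood hstop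
      have hfreshk : pvP a d (k + 1) ∉ acc := hfresh (k + 1) (by omega) hkN'
      have hfresh2 : ∀ j, k + 1 < j → j ≤ N → pvP a d j ∉ acc ++ [pvP a d (k + 1)] := by
        intro j hj1 hj2
        simp only [List.mem_append, List.mem_singleton]
        push_neg
        refine ⟨hfresh j (by omega) hj2, fun hc => ?_⟩
        exact absurd (pvP_inj hdne hc) (by omega)
      have hg' : ((0 ≤ a.1 - (k + 1) * d.1 ∧ a.1 - (k + 1) * d.1 < bounds.1) ∧
          (0 ≤ a.2 - (k + 1) * d.2 ∧ a.2 - (k + 1) * d.2 < bounds.2)) := hg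
      rw [if_pos hg',
        show ((a.1 - (k + 1) * d.1, a.2 - (k + 1) * d.2) : Int × Int) = pvP a d (k + 1) from rfl,
        PySem.Set.add_of_not_mem hfreshk,
        ih (k + 1) (acc ++ [pvP a d (k + 1)]) (by omega) hkN' (by omega) hfresh2,
        PySem.List.pyRange_one_cons (show k + 1 < N + 1 by omega)]
      simp

-- A's loop, started at a with enough fuel, produces the points 1 .. N
lemma pvWalk_top (a d bounds : Int × Int) (N : Int) (hN0 : 0 ≤ N)
    (hgood : ∀ k, 1 ≤ k → k ≤ N → pvGood a d bounds k)
    (hstop : ¬ pvGood a d bounds (N + 1))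
    (hfuel : N.toNat ≤ bounds.1.toNat + bounds.2.toNat + 1) :
    pvWalk d bounds (bounds.1.toNat + bounds.2.toNat + 1) a.1 a.2 PySem.Set.empty
      = (PySem.List.pyRange 1 (N + 1) 1).map (pvP a d) := by
  have h := pvWalk_spec a d bounds N hN0 hgood hstop (bounds.1.toNat + bounds.2.toNat + 1) 0
    PySem.Set.empty (le_refl 0) hN0 (by omega)
    (by intro j _ _ hc; simp [PySem.Set.empty] at hc)
  simpa [PySem.Set.empty] using h

lemma pvMk_eq_map (a d : Int × Int) (N : Int) (hd : 1 ≤ N → d.1 ≠ 0 ∨ d.2 ≠ 0) :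
    pvMk a d N = (PySem.List.pyRange 1 (N + 1) 1).map (pvP a d) := by
  unfold pvMk
  by_cases hN : N < 1
  · rw [PySem.List.pyRange_one_eq_nil (by omega)]
    rfl
  · have hnd : (((PySem.List.pyRange 1 (N + 1) 1).map (pvP a d))).Nodup := by
      refine List.Nodup.map_on ?_ (PySem.List.nodup_pyRange_one 1 (N + 1))
      intro j _ k _ h
      exact pvP_inj (hd (by omega)) h
    exact PySem.Set.ofList_eq_self_of_nodup _ hnd

-- ===== VERDICT (by name: the statement is the Claim_ definition above) =====
theorem find_all_antinodes_spec : Claim_equal_find_all_antinodes := by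
  intro a b bounds _ hpre
  obtain ⟨a1, a2⟩ := a
  obtain ⟨b1, b2⟩ := b
  obtain ⟨c1, c2⟩ := bounds
  unfold Spec_find_all_antinodes
  rcases hk0 : pvKdim a1 (a1 - b1) c1 with _ | K0 <;> rcases hk1 : pvKdim a2 (a2 - b2) c2 with _ | K1
  · -- both dimensions unbounded: a = b inside bounds, excluded by Pre_
    obtain ⟨hz0, hi0, hi0'⟩ := pvKdim_none hk0
    obtain ⟨hz1, hi1, hi1'⟩ := pvKdim_none hk1
    refine absurd ⟨?_, hi0, hi0', hi1, hi1'⟩ hpre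
    rw [Prod.mk.injEq]
    omega
  · -- dimension 0 unbounded, dimension 1 bounds the walk at K1 steps
    obtain ⟨hz0, hi0, hi0'⟩ := pvKdim_none hk0
    obtain ⟨⟨hK1, hKb1⟩, hgood1, hstop1⟩ := pvKdim_some hk1
    have hB : find_all_antinodes_alt (a1, a2) (b1, b2) (c1, c2)
        = pvMk (a1, a2) (a1 - b1, a2 - b2) K1 := by
      simp only [find_all_antinodes_alt, hk0, hk1]
    have hgood : ∀ k, 1 ≤ k → k ≤ K1 → pvGood (a1, a2) (a1 - b1, a2 - b2) (c1, c2) k := by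
      intro k h1 h2
      refine ⟨?_, hgood1 k h1 h2⟩
      show pvG a1 (a1 - b1) c1 k
      rw [hz0]
      exact pvG_of_zero hi0 hi0' k
    have hstop : ¬ pvGood (a1, a2) (a1 - b1, a2 - b2) (c1, c2) (K1 + 1) := fun hc => hstop1 hc.2
    rw [hB, pvMk_eq_map _ _ _ (fun h => pvD_ne h hgood hstop)]
    exact pvWalk_top (a1, a2) (a1 - b1, a2 - b2) (c1, c2) K1 hK1 hgood hstop (by omega)
  · -- dimension 1 unbounded, dimension 0 bounds the walk at K0 steps
    obtain ⟨hz1, hi1, hi1'⟩ := pvKdim_none hk1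
    obtain ⟨⟨hK0, hKb0⟩, hgood0, hstop0⟩ := pvKdim_some hk0
    have hB : find_all_antinodes_alt (a1, a2) (b1, b2) (c1, c2)
        = pvMk (a1, a2) (a1 - b1, a2 - b2) K0 := by
      simp only [find_all_antinodes_alt, hk0, hk1]
    have hgood : ∀ k, 1 ≤ k → k ≤ K0 → pvGood (a1, a2) (a1 - b1, a2 - b2) (c1, c2) k := by
      intro k h1 h2
      refine ⟨hgood0 k h1 h2, ?_⟩
      show pvG a2 (a2 - b2) c2 k
      rw [hz1]
      exact pvG_of_zero hi1 hi1' k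
    have hstop : ¬ pvGood (a1, a2) (a1 - b1, a2 - b2) (c1, c2) (K0 + 1) := fun hc => hstop0 hc.1
    rw [hB, pvMk_eq_map _ _ _ (fun h => pvD_ne h hgood hstop)]
    exact pvWalk_top (a1, a2) (a1 - b1, a2 - b2) (c1, c2) K0 hK0 hgood hstop (by omega)
  · -- both dimensions bounded: the walk length is the minimum
    obtain ⟨⟨hK0, hKb0⟩, hgood0, hstop0⟩ := pvKdim_some hk0
    obtain ⟨⟨hK1, hKb1⟩, hgood1, hstop1⟩ := pvKdim_some hk1
    have hB : find_all_antinodes_alt (a1, a2) (b1, b2) (c1, c2)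
        = pvMk (a1, a2) (a1 - b1, a2 - b2) (min K0 K1) := by
      simp only [find_all_antinodes_alt, hk0, hk1]
    rcases le_total K0 K1 with hm | hm
    · have hgood : ∀ k, 1 ≤ k → k ≤ K0 → pvGood (a1, a2) (a1 - b1, a2 - b2) (c1, c2) k :=
        fun k h1 h2 => ⟨hgood0 k h1 h2, hgood1 k h1 (by omega)⟩
      have hstop : ¬ pvGood (a1, a2) (a1 - b1, a2 - b2) (c1, c2) (K0 + 1) := fun hc => hstop0 hc.1
      rw [hB, min_eq_left hm, pvMk_eq_map _ _ _ (fun h => pvD_ne h hgood hstop)]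
      exact pvWalk_top (a1, a2) (a1 - b1, a2 - b2) (c1, c2) K0 hK0 hgood hstop (by omega)
    · have hgood : ∀ k, 1 ≤ k → k ≤ K1 → pvGood (a1, a2) (a1 - b1, a2 - b2) (c1, c2) k :=
        fun k h1 h2 => ⟨hgood0 k h1 (by omega), hgood1 k h1 h2⟩
      have hstop : ¬ pvGood (a1, a2) (a1 - b1, a2 - b2) (c1, c2) (K1 + 1) := fun hc => hstop1 hc.2
      rw [hB, min_eq_right hm, pvMk_eq_map _ _ _ (fun h => pvD_ne h hgood hstop)]
      exact pvWalk_top (a1, a2) (a1 - b1, a2 - b2) (c1, c2) K1 hK1 hgood hstop (by omega)
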